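-- pv_equiv track=rewrite | github.com/postvakje/oeis-sequences | oeis-sequences/OEISsequences.py | A081134
-- ===== SOURCE A (Python) =====
-- def A081134(n):
--     kmin, kmax = 0, 1
--     while 3 ** kmax <= n:
--         kmax *= 2
--     while True:
--         kmid = (kmax + kmin) // 2
--         if 3 ** kmid > n:
--             kmax = kmid
--         else:
--             kmin = kmid
--         if kmax - kmin <= 1:
--             break
--     return min(n - 3 ** kmin, 3 * 3 ** kmin - n)
-- ===== SOURCE B (Python) =====
-- def A081134(n):
--     p = 1
--     while p * 3 <= n:
--         p *= 3
--     return min(n - p, 3 * p - n)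
-- ===== Notes on version B (the rewrite author's own statement) =====
-- stated objective: simpler
-- what changed: Replaces the exponent-doubling plus binary-search hunt for floor(log3 n) with a single loop that multiplies a power accumulator by 3 until it would exceed n, then applies the same min expression.
import Mathlib
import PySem

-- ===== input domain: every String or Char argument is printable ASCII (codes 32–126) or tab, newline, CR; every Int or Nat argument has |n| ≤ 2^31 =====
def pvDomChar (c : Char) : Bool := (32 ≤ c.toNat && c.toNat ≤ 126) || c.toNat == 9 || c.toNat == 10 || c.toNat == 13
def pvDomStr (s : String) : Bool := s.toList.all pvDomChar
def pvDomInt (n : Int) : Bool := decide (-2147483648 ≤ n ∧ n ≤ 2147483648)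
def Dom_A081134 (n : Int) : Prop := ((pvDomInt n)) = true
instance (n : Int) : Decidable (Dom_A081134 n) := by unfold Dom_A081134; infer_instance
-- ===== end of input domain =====

-- B replaces A's exponent-doubling + binary search for the power of 3 by a single
-- multiply-by-3 scan; objective: simpler.

-- ===== PORT A =====

-- termination helper for the doubling loop (cited by pvGrow's decreasing_by)
theorem pv_two_mul_le_pow3 (k : Nat) : (2 * k : Int) ≤ 3 ^ k := by
  induction k with
  | zero => norm_num
  | succ m ih =>
      have h1 : (1 : Int) ≤ 3 ^ m := one_le_pow₀ (by norm_num)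
      rw [pow_succ]; push_cast; nlinarith

-- first while loop of A: kmax = 1; while 3 ** kmax <= n: kmax *= 2
-- (the exponent kmax is provably ≥ 1 throughout, so `.toNat` on it is exact)
def pvGrow (n kmax : Int) (hk : 1 ≤ kmax) : Int :=
  if h : (3 : Int) ^ kmax.toNat ≤ n then
    pvGrow n (kmax * 2) (by omega)
  else kmax
termination_by (n + 1 - kmax).toNat
decreasing_by
  have h2 := pv_two_mul_le_pow3 kmax.toNat
  have h3 : (kmax.toNat : Int) = kmax := by omega
  rw [h3] at h2
  omega

-- second while loop of A: do-while bisection of [kmin, kmax); returns the final kmin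
-- (the exponent kmid is provably ≥ 0 on every reached call, so `.toNat` on it is exact)
def pvBisect (n kmin kmax : Int) : Int :=
  let kmid := PySem.Int.floordiv (kmax + kmin) 2
  if _hb : (3 : Int) ^ kmid.toNat > n then
    if _hle : kmid - kmin ≤ 1 then kmin
    else pvBisect n kmin kmid
  else
    if _hle : kmax - kmid ≤ 1 then kmid
    else pvBisect n kmid kmax
termination_by (kmax - kmin).toNat
decreasing_by
  all_goals
    have hd : PySem.Int.floordiv (kmax + kmin) 2 = (kmax + kmin) / 2 :=
      PySem.Int.floordiv_eq_ediv_of_pos (by norm_num)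
    simp only [kmid, hd] at *
    omega

def A081134 (n : Int) : Int :=
  let kmax := pvGrow n 1 (le_refl 1)
  let kmin := pvBisect n 0 kmax
  min (n - 3 ^ kmin.toNat) (3 * 3 ^ kmin.toNat - n)

-- ===== PORT B =====

-- B's loop: p = 1; while p * 3 <= n: p *= 3
def pvPow3 (n p : Int) (hp : 1 ≤ p) : Int :=
  if h : p * 3 ≤ n then pvPow3 n (p * 3) (by omega) else p
termination_by (n - p).toNat
decreasing_by omega

def A081134_alt (n : Int) : Int :=
  let p := pvPow3 n 1 (le_refl 1)
  min (n - p) (3 * p - n)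

-- ===== PRECONDITION & SPEC =====
def Spec_A081134 (n : Int) (out : Int) : Prop := out = A081134_alt n
instance (n : Int) (out : Int) : Decidable (Spec_A081134 n out) := by unfold Spec_A081134; infer_instance

-- ===== CLAIM (what is proved, stated in full; the proofs are below) =====
def Claim_equal_A081134 : Prop := ∀ (n : Int), Dom_A081134 n → Spec_A081134 n (A081134 n)

-- ===== LEMMAS AND PROOFS =====

-- the doubling loop's exit guarantees
theorem pvGrow_spec (n kmax : Int) (hk : 1 ≤ kmax) :
    1 ≤ pvGrow n kmax hk ∧ n < 3 ^ (pvGrow n kmax hk).toNat := by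
  fun_induction pvGrow with
  | case1 kmax hk h ih => exact ih
  | case2 kmax hk h => exact ⟨hk, by omega⟩

-- both loops produce a power q of 3 with n < 3*q and (q ≤ n or q = 1); such a q is unique
theorem pv_pow3_unique (n q1 q2 : Int) (a b : Nat) (e1 : q1 = 3 ^ a) (e2 : q2 = 3 ^ b)
    (g1 : n < 3 * q1) (g2 : n < 3 * q2)
    (d1 : q1 ≤ n ∨ q1 = 1) (d2 : q2 ≤ n ∨ q2 = 1) : q1 = q2 := by
  rcases Nat.lt_trichotomy a b with h | h | h
  · exfalso
    have hmono : (3 : Int) ^ (a + 1) ≤ 3 ^ b := pow_le_pow_right₀ (by norm_num) (by omega)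
    rw [pow_succ] at hmono
    have hb1 : (1 : Int) < 3 ^ b := one_lt_pow₀ (by norm_num) (by omega)
    rcases d2 with h2 | h2
    · nlinarith
    · omega
  · rw [e1, e2, h]
  · exfalso
    have hmono : (3 : Int) ^ (b + 1) ≤ 3 ^ a := pow_le_pow_right₀ (by norm_num) (by omega)
    rw [pow_succ] at hmono
    have ha1 : (1 : Int) < 3 ^ a := one_lt_pow₀ (by norm_num) (by omega)
    rcases d1 with h2 | h2
    · nlinarith
    · omega

theorem pvBisect_spec (n kmin kmax : Int) (h0 : 0 ≤ kmin) (h1 : kmin < kmax)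
    (hmax : n < 3 ^ kmax.toNat) (hmin : 3 ^ kmin.toNat ≤ n ∨ kmin = 0) :
    0 ≤ pvBisect n kmin kmax ∧
    n < 3 ^ ((pvBisect n kmin kmax).toNat + 1) ∧
    (3 ^ (pvBisect n kmin kmax).toNat ≤ n ∨ pvBisect n kmin kmax = 0) := by
  fun_induction pvBisect with
  | case1 kmin kmax kmid hb hle =>
      -- returns kmin, with kmid ∈ {kmin, kmin+1}
      have hd : PySem.Int.floordiv (kmax + kmin) 2 = (kmax + kmin) / 2 :=
        PySem.Int.floordiv_eq_ediv_of_pos (by norm_num)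
      simp only [kmid, hd] at hb hle
      refine ⟨h0, ?_, hmin⟩
      rcases (by omega : (kmax + kmin) / 2 = kmin ∨ (kmax + kmin) / 2 = kmin + 1) with he | he
      · have hm : (3 : Int) ^ kmin.toNat ≤ 3 ^ (kmin.toNat + 1) :=
          pow_le_pow_right₀ (by norm_num) (by omega)
        rw [he] at hb; omega
      · have ht : ((kmax + kmin) / 2).toNat = kmin.toNat + 1 := by omega
        rw [ht] at hb; omega
  | case2 kmin kmax kmid hb hle ih =>
      have hd : PySem.Int.floordiv (kmax + kmin) 2 = (kmax + kmin) / 2 :=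
        PySem.Int.floordiv_eq_ediv_of_pos (by norm_num)
      simp only [kmid, hd] at hb hle ih ⊢
      exact ih h0 (by omega) hb hmin
  | case3 kmin kmax kmid hb hle =>
      -- returns kmid, with kmax = kmid + 1
      have hd : PySem.Int.floordiv (kmax + kmin) 2 = (kmax + kmin) / 2 :=
        PySem.Int.floordiv_eq_ediv_of_pos (by norm_num)
      simp only [kmid, hd] at hb hle ⊢
      have he : kmax.toNat = ((kmax + kmin) / 2).toNat + 1 := by omega
      rw [he] at hmax
      exact ⟨by omega, hmax, Or.inl (by omega)⟩
  | case4 kmin kmax kmid hb hle ih =>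
      have hd : PySem.Int.floordiv (kmax + kmin) 2 = (kmax + kmin) / 2 :=
        PySem.Int.floordiv_eq_ediv_of_pos (by norm_num)
      simp only [kmid, hd] at hb hle ih ⊢
      exact ih (by omega) (by omega) hmax (Or.inl (by omega))

theorem pvPow3_spec (n p : Int) (hp : 1 ≤ p) (hk : ∃ k : Nat, p = 3 ^ k) :
    (∃ m : Nat, pvPow3 n p hp = 3 ^ m) ∧ n < 3 * pvPow3 n p hp ∧
    (pvPow3 n p hp ≤ n ∨ pvPow3 n p hp = p) := by
  fun_induction pvPow3 with
  | case1 p hp h ih =>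
      obtain ⟨k, hk⟩ := hk
      obtain ⟨hm, hg, hd⟩ := ih ⟨k + 1, by rw [hk, pow_succ]⟩
      refine ⟨hm, hg, Or.inl ?_⟩
      rcases hd with hd | hd
      · exact hd
      · omega
  | case2 p hp h =>
      exact ⟨hk, by omega, Or.inr rfl⟩

-- ===== VERDICT (by name: the statement is the Claim_ definition above) =====
theorem A081134_spec : Claim_equal_A081134 := by
  intro n _
  unfold Spec_A081134 A081134 A081134_alt
  dsimp only []
  have hg := pvGrow_spec n 1 (le_refl 1)
  obtain ⟨hr0, hr1, hr2⟩ :=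
    pvBisect_spec n 0 (pvGrow n 1 (le_refl 1)) (le_refl 0) hg.1 hg.2 (Or.inr rfl)
  obtain ⟨⟨m, hm⟩, hq1, hq2⟩ := pvPow3_spec n 1 (le_refl 1) ⟨0, by norm_num⟩
  have hkey : (3 : Int) ^ (pvBisect n 0 (pvGrow n 1 (le_refl 1))).toNat
      = pvPow3 n 1 (le_refl 1) := by
    apply pv_pow3_unique n _ _ _ m rfl hm
    · rw [← pow_succ']; exact hr1
    · exact hq1
    · rcases hr2 with h | h
      · exact Or.inl h
      · exact Or.inr (by rw [h]; norm_num)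
    · exact hq2
  rw [hkey]
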